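-- pv_equiv track=rewrite | github.com/52HZMercury/SimLVSeg-with-SegMamba | MooreCurve.py | coords_to_2d_array
-- ===== SOURCE A (Python) =====
-- def coords_to_2d_array(points):
--     """将坐标序列转换为二维数组（辅助函数）"""
--     if not points:
--         return []
--
--     # 计算坐标范围
--     min_x = min(p[0] for p in points)
--     max_x = max(p[0] for p in points)
--     min_y = min(p[1] for p in points)
--     max_y = max(p[1] for p in points)
--
--     # 初始化数组
--     rows = max_y - min_y + 1
--     cols = max_x - min_x + 1
--     grid = [[0 for _ in range(cols)] for _ in range(rows)]
--
--     # 填充遍历顺序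
--     for step, (x, y) in enumerate(points):
--         grid[y - min_y][x - min_x] = step + 1
--
--     return grid
-- ===== SOURCE B (Python) =====
-- def coords_to_2d_array(points):
--     """将坐标序列转换为二维数组（辅助函数）"""
--     if not points:
--         return []
--
--     # map each coordinate to its 1-based visit order (last visit wins)
--     order = {}
--     for step, (x, y) in enumerate(points, 1):
--         order[(x, y)] = step
--
--     min_x = min(p[0] for p in points)
--     max_x = max(p[0] for p in points)
--     min_y = min(p[1] for p in points)
--     max_y = max(p[1] for p in points)
--
--     # gather: each cell looks its coordinate up in the map
--     return [[order.get((c + min_x, r + min_y), 0)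
--              for c in range(max_x - min_x + 1)]
--             for r in range(max_y - min_y + 1)]
-- ===== Notes on version B (the rewrite author's own statement) =====
-- stated objective: alternative
-- what changed: Replaces the scatter-style in-place writes into a preallocated grid by a gather-style construction: a dict maps each coordinate to its last 1-based visit order, and the grid is built directly by a nested comprehension looking each cell up in that dict.
import Mathlib
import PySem

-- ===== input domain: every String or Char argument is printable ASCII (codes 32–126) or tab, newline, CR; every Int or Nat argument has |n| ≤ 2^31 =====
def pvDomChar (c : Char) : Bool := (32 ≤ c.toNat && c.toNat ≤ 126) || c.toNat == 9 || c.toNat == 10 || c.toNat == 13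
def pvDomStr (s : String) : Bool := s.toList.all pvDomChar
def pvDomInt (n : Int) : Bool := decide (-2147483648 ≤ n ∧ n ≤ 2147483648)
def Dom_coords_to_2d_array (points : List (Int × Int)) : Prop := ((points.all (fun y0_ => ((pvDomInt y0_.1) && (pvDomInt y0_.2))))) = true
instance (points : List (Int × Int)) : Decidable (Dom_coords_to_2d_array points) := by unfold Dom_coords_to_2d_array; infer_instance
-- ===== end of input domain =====

-- B replaces A's scatter writes into a preallocated grid by a gather construction:
-- a dict from coordinate to last 1-based visit order, then a nested comprehension (objective: alternative).

-- ===== PORT A =====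
-- grid[y - min_y][x - min_x] = step + 1  (read the row, set the cell, set the row back)
def pvScatter (min_x min_y : Int) (g : List (List Int)) (sp : Int × (Int × Int)) : List (List Int) :=
  PySem.List.pySetD g (sp.2.2 - min_y)
    (PySem.List.pySetD (PySem.List.pyGetD g (sp.2.2 - min_y) []) (sp.2.1 - min_x) (sp.1 + 1))

def coords_to_2d_array (points : List (Int × Int)) : List (List Int) :=
  if points = [] then []
  else
    let min_x := (PySem.List.min? (points.map (·.1)) (fun v => v)).getD 0
    let max_x := (PySem.List.max? (points.map (·.1)) (fun v => v)).getD 0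
    let min_y := (PySem.List.min? (points.map (·.2)) (fun v => v)).getD 0
    let max_y := (PySem.List.max? (points.map (·.2)) (fun v => v)).getD 0
    let rows := max_y - min_y + 1
    let cols := max_x - min_x + 1
    let grid := List.replicate rows.toNat (List.replicate cols.toNat (0 : Int))
    (PySem.List.enumerate points 0).foldl (pvScatter min_x min_y) grid

-- ===== PORT B =====
def coords_to_2d_array_alt (points : List (Int × Int)) : List (List Int) :=
  if points = [] then []
  else
    let order := (PySem.List.enumerate points 1).foldl
      (fun d sp => d.insert sp.2 sp.1) (PySem.Dict.empty (κ := Int × Int) (ν := Int))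
    let min_x := (PySem.List.min? (points.map (·.1)) (fun v => v)).getD 0
    let max_x := (PySem.List.max? (points.map (·.1)) (fun v => v)).getD 0
    let min_y := (PySem.List.min? (points.map (·.2)) (fun v => v)).getD 0
    let max_y := (PySem.List.max? (points.map (·.2)) (fun v => v)).getD 0
    (PySem.List.pyRange 0 (max_y - min_y + 1) 1).map (fun r =>
      (PySem.List.pyRange 0 (max_x - min_x + 1) 1).map (fun c =>
        order.getD (c + min_x, r + min_y) 0))

-- ===== PRECONDITION & SPEC =====
def Spec_coords_to_2d_array (points : List (Int × Int)) (out : List (List Int)) : Prop := out = coords_to_2d_array_alt points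
instance (points : List (Int × Int)) (out : List (List Int)) : Decidable (Spec_coords_to_2d_array points out) := by unfold Spec_coords_to_2d_array; infer_instance

-- ===== CLAIM (what is proved, stated in full; the proofs are below) =====
def Claim_equal_coords_to_2d_array : Prop := ∀ (points : List (Int × Int)), Dom_coords_to_2d_array points → Spec_coords_to_2d_array points (coords_to_2d_array points)

-- ===== LEMMAS AND PROOFS =====

def pvCell (g : List (List Int)) (r c : Nat) : Int := (g.getD r []).getD c 0

lemma pvGetD_set_self {α : Type} (l : List α) (i : Nat) (a d : α) (h : i < l.length) :
    (l.set i a).getD i d = a := by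
  simp [List.getD_eq_getElem?_getD, h]

lemma pvGetD_set_ne {α : Type} (l : List α) (i j : Nat) (a d : α) (h : j ≠ i) :
    (l.set i a).getD j d = l.getD j d := by
  simp [List.getD_eq_getElem?_getD, (Ne.symm h : i ≠ j)]

lemma pvScatter_shape (min_x min_y : Int) (g : List (List Int)) (sp : Int × (Int × Int))
    (cols : Nat) (hrows : ∀ row ∈ g, row.length = cols)
    (hy0 : 0 ≤ sp.2.2 - min_y) (hyl : (sp.2.2 - min_y).toNat < g.length)
    (hx0 : 0 ≤ sp.2.1 - min_x) :
    (pvScatter min_x min_y g sp).length = g.length ∧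
      ∀ row ∈ pvScatter min_x min_y g sp, row.length = cols := by
  unfold pvScatter
  rw [PySem.List.pySetD_of_nonneg (h := hy0), PySem.List.pySetD_of_nonneg (h := hx0),
    PySem.List.pyGetD_of_nonneg (h := hy0)]
  refine ⟨List.length_set .., ?_⟩
  intro row hrow
  rcases List.mem_or_eq_of_mem_set hrow with h | h
  · exact hrows _ h
  · subst h
    rw [List.length_set, List.getD_eq_getElem _ _ hyl]
    exact hrows _ (List.getElem_mem _)

lemma pvCell_scatter (min_x min_y : Int) (g : List (List Int)) (sp : Int × (Int × Int))
    (r c : Nat)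
    (hy0 : 0 ≤ sp.2.2 - min_y) (hyl : (sp.2.2 - min_y).toNat < g.length)
    (hx0 : 0 ≤ sp.2.1 - min_x) (hxl : (sp.2.1 - min_x).toNat < (g.getD (sp.2.2 - min_y).toNat []).length) :
    pvCell (pvScatter min_x min_y g sp) r c =
      if r = (sp.2.2 - min_y).toNat ∧ c = (sp.2.1 - min_x).toNat then sp.1 + 1
      else pvCell g r c := by
  unfold pvScatter pvCell
  rw [PySem.List.pySetD_of_nonneg (h := hy0), PySem.List.pySetD_of_nonneg (h := hx0),
    PySem.List.pyGetD_of_nonneg (h := hy0)]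
  by_cases hr : r = (sp.2.2 - min_y).toNat
  · subst hr
    rw [pvGetD_set_self _ _ _ _ hyl]
    by_cases hc : c = (sp.2.1 - min_x).toNat
    · subst hc
      rw [pvGetD_set_self _ _ _ _ hxl]
      simp
    · rw [pvGetD_set_ne _ _ _ _ _ hc, if_neg (by tauto)]
  · rw [pvGetD_set_ne _ _ _ _ _ hr, if_neg (by tauto)]
lemma pvInv (min_x min_y : Int) (cols : Nat)
    (l : List (Int × Int)) (s : Int)
    (g : List (List Int)) (d : PySem.Dict (Int × Int) Int)
    (hrows : ∀ row ∈ g, row.length = cols)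
    (hrange : ∀ p ∈ l, 0 ≤ p.2 - min_y ∧ (p.2 - min_y).toNat < g.length ∧
                        0 ≤ p.1 - min_x ∧ (p.1 - min_x).toNat < cols)
    (hinv : ∀ r c : Nat, r < g.length → c < cols →
      pvCell g r c = d.getD ((c : Int) + min_x, (r : Int) + min_y) 0) :
    ((PySem.List.enumerate l s).foldl (pvScatter min_x min_y) g).length = g.length ∧
    (∀ row ∈ (PySem.List.enumerate l s).foldl (pvScatter min_x min_y) g, row.length = cols) ∧
      ∀ r c : Nat, r < g.length → c < cols →
        pvCell ((PySem.List.enumerate l s).foldl (pvScatter min_x min_y) g) r c =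
          ((PySem.List.enumerate l (s + 1)).foldl (fun d sp => d.insert sp.2 sp.1) d).getD
            ((c : Int) + min_x, (r : Int) + min_y) 0 := by
  induction l generalizing s g d with
  | nil => exact ⟨rfl, hrows, by simpa using hinv⟩
  | cons p t ih =>
    obtain ⟨hy0, hyl, hx0, hxc⟩ := hrange p List.mem_cons_self
    have hxl : (p.1 - min_x).toNat < (g.getD (p.2 - min_y).toNat []).length := by
      rw [List.getD_eq_getElem _ _ hyl, hrows _ (List.getElem_mem _)]; exact hxc
    simp only [PySem.List.enumerate_cons, List.foldl_cons]
    have hshape := pvScatter_shape min_x min_y g (s, p) cols hrows hy0 hyl hx0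
    have hinv1 : ∀ r c : Nat, r < (pvScatter min_x min_y g (s, p)).length → c < cols →
        pvCell (pvScatter min_x min_y g (s, p)) r c =
          (d.insert p (s + 1)).getD ((c : Int) + min_x, (r : Int) + min_y) 0 := by
      intro r c hrl hcl
      rw [hshape.1] at hrl
      rw [pvCell_scatter min_x min_y g (s, p) r c hy0 hyl hx0 hxl,
        PySem.Dict.getD_insert]
      have hiff : ((c : Int) + min_x, (r : Int) + min_y) = p ↔
          (r = (p.2 - min_y).toNat ∧ c = (p.1 - min_x).toNat) := by
        rw [Prod.ext_iff]
        constructor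
        · rintro ⟨h1, h2⟩; constructor <;> omega
        · rintro ⟨h1, h2⟩
          constructor <;> simp only [h1, h2] <;> omega
      by_cases hcond : ((c : Int) + min_x, (r : Int) + min_y) = p
      · rw [if_pos hcond, if_pos (hiff.mp hcond)]
      · rw [if_neg hcond, if_neg (fun hh => hcond (hiff.mpr hh))]
        exact hinv r c hrl hcl
    have hrange1 : ∀ q ∈ t, 0 ≤ q.2 - min_y ∧ (q.2 - min_y).toNat < (pvScatter min_x min_y g (s, p)).length ∧
        0 ≤ q.1 - min_x ∧ (q.1 - min_x).toNat < cols := by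
      intro q hq
      have := hrange q (List.mem_cons_of_mem _ hq)
      rw [hshape.1]; exact this
    have := ih (s + 1) (pvScatter min_x min_y g (s, p)) (d.insert p (s + 1)) hshape.2 hrange1 hinv1
    refine ⟨by rw [this.1, hshape.1], this.2.1, ?_⟩
    intro r c hrl hcl
    have h := this.2.2 r c (by rw [hshape.1]; exact hrl) hcl
    simpa using h
theorem pvMain (points : List (Int × Int)) :
    coords_to_2d_array points = coords_to_2d_array_alt points := by
  by_cases hnil : points = []
  · simp [coords_to_2d_array, coords_to_2d_array_alt, hnil]
  · obtain ⟨mnx, hmnx⟩ : ∃ v, PySem.List.min? (points.map (·.1)) (fun v => v) = some v := by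
      rcases h : PySem.List.min? (points.map (·.1)) (fun v => v) with _ | v
      · rw [PySem.List.min?_eq_none_iff] at h; simp [hnil] at h
      · exact ⟨v, h⟩
    obtain ⟨mxx, hmxx⟩ : ∃ v, PySem.List.max? (points.map (·.1)) (fun v => v) = some v := by
      rcases h : PySem.List.max? (points.map (·.1)) (fun v => v) with _ | v
      · rw [PySem.List.max?_eq_none_iff] at h; simp [hnil] at h
      · exact ⟨v, h⟩
    obtain ⟨mny, hmny⟩ : ∃ v, PySem.List.min? (points.map (·.2)) (fun v => v) = some v := by
      rcases h : PySem.List.min? (points.map (·.2)) (fun v => v) with _ | v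
      · rw [PySem.List.min?_eq_none_iff] at h; simp [hnil] at h
      · exact ⟨v, h⟩
    obtain ⟨mxy, hmxy⟩ : ∃ v, PySem.List.max? (points.map (·.2)) (fun v => v) = some v := by
      rcases h : PySem.List.max? (points.map (·.2)) (fun v => v) with _ | v
      · rw [PySem.List.max?_eq_none_iff] at h; simp [hnil] at h
      · exact ⟨v, h⟩
    have hbx : ∀ p ∈ points, mnx ≤ p.1 ∧ p.1 ≤ mxx := by
      intro p hp
      have hm := PySem.List.min?_isMin hmnx p.1 (List.mem_map_of_mem hp)
      have hM := PySem.List.max?_isMax hmxx p.1 (List.mem_map_of_mem hp)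
      exact ⟨hm, hM⟩
    have hby : ∀ p ∈ points, mny ≤ p.2 ∧ p.2 ≤ mxy := by
      intro p hp
      have hm := PySem.List.min?_isMin hmny p.2 (List.mem_map_of_mem hp)
      have hM := PySem.List.max?_isMax hmxy p.2 (List.mem_map_of_mem hp)
      exact ⟨hm, hM⟩
    simp only [coords_to_2d_array, coords_to_2d_array_alt, if_neg hnil,
      hmnx, hmxx, hmny, hmxy, Option.getD_some]
    set rows : Int := mxy - mny + 1 with hrows_def
    set cols : Int := mxx - mnx + 1 with hcols_def
    set g0 : List (List Int) := List.replicate rows.toNat (List.replicate cols.toNat 0) with hg0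
    have key := pvInv mnx mny cols.toNat points 0 g0 PySem.Dict.empty
      (by intro row hrow; rw [List.eq_of_mem_replicate hrow]; exact List.length_replicate)
      (by intro p hp
          obtain ⟨h1, h2⟩ := hbx p hp
          obtain ⟨h3, h4⟩ := hby p hp
          refine ⟨by omega, ?_, by omega, by omega⟩
          rw [hg0, List.length_replicate]; omega)
      (by intro r c hrl hcl
          rw [hg0] at hrl ⊢
          simp [pvCell, List.getD_eq_getElem?_getD, List.getElem?_replicate]
          split <;> simp)
    set gA := (PySem.List.enumerate points 0).foldl (pvScatter mnx mny) g0 with hgA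
    set order := (PySem.List.enumerate points 1).foldl
      (fun d sp => d.insert sp.2 sp.1) (PySem.Dict.empty (κ := Int × Int) (ν := Int)) with horder
    have hord : ∀ r c : Nat, r < g0.length → c < cols.toNat →
        pvCell gA r c = order.getD ((c : Int) + mnx, (r : Int) + mny) 0 := by
      intro r c h1 h2
      have := key.2.2 r c h1 h2
      norm_num at this
      exact this
    have hlen0 : g0.length = rows.toNat := by rw [hg0]; exact List.length_replicate
    apply List.ext_getElem
    · rw [key.1, hlen0]
      simp [PySem.List.length_pyRange_one]
    · intro i h1 h2
      rw [List.getElem_map]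
      apply List.ext_getElem
      · rw [key.2.1 _ (List.getElem_mem _)]
        simp [PySem.List.length_pyRange_one]
      · intro j h3 h4
        rw [List.getElem_map, PySem.List.getElem_pyRange_one, PySem.List.getElem_pyRange_one]
        have hi : i < g0.length := by rw [key.1] at h1; exact h1
        have hj : j < cols.toNat := by rw [key.2.1 _ (List.getElem_mem _)] at h3; exact h3
        have := hord i j hi hj
        rw [pvCell, List.getD_eq_getElem _ _ h1, List.getD_eq_getElem _ _ h3] at this
        rw [this]
        norm_num

-- ===== VERDICT (by name: the statement is the Claim_ definition above) =====
theorem coords_to_2d_array_spec : Claim_equal_coords_to_2d_array := by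
  intro points _
  unfold Spec_coords_to_2d_array
  exact pvMain points
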